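-- pv_equiv track=rewrite | github.com/cloudygoose/blindspot_nlg | wiki/entity_mod.py | split_by_multiple_keep_delim
-- ===== SOURCE A (Python) =====
-- def split_by_multiple_keep_delim(text: str, delims: list):
--     '''return stripped components (subsentences)'''
--     res = [text]
--     for delim in delims:
--         new_res = []
--         for s in res:
--             orig_split = s.split(delim)
--             component = [c + (delim if i != len(orig_split)-1 else '') for i, c in enumerate(orig_split)]
--             new_res.extend(component)
--         res = new_res
--     res = [s.strip() for s in res if len(s) > 0]
--     return res
-- ===== SOURCE B (Python) =====
-- def split_by_multiple_keep_delim(text: str, delims: list):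
--     '''return stripped components (subsentences)'''
--     # Mark every boundary with a sentinel (absent from the ASCII input domain),
--     # then split once at the end instead of re-splitting a growing list of pieces.
--     SENT = '\x00'
--     for delim in delims:
--         text = text.replace(delim, delim + SENT)
--     return [part.strip() for part in text.split(SENT) if part]
-- ===== Notes on version B (the rewrite author's own statement) =====
-- stated objective: faster
-- what changed: B never builds intermediate lists of pieces: it inserts a sentinel boundary character (absent from the ASCII input domain) after every delimiter occurrence with one replace per delimiter on a single accumulated string, then splits once on the sentinel, strips and drops empties; A instead re-splits a growing list of pieces for each delimiter and reassembles them with appended delimiters.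
import Mathlib
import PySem

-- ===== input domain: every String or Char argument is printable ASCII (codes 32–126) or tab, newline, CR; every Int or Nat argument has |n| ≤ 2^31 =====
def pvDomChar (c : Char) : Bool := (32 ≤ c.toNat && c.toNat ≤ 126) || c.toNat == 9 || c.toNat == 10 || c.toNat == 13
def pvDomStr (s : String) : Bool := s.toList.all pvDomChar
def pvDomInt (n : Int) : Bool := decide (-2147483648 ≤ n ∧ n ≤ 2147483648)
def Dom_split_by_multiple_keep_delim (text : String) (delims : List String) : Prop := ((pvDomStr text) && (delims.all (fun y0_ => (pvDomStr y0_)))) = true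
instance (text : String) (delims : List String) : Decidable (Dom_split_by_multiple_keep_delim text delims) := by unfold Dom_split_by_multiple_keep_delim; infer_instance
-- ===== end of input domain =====

-- B replaces A's repeated split-and-reassemble of a growing piece list by one replace per
-- delimiter that inserts a sentinel boundary character, followed by a single split (measured
-- faster: no per-piece Python-level loop or list rebuilding).

-- ===== PORT A =====
def split_by_multiple_keep_delim (text : String) (delims : List String) : List String :=
  let res : List (List Char) :=
    (delims.map String.toList).foldl
      (fun res delim =>
        res.flatMap (fun s =>
          let origSplit := (PySem.Chars.split? s delim).getD []
          (PySem.List.enumerate origSplit).map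
            (fun ic => ic.2 ++ (if ic.1 ≠ (origSplit.length : Int) - 1 then delim else []))))
      [text.toList]
  (res.filter (fun s => 0 < s.length)).map (fun s => String.ofList (PySem.Chars.strip s))

-- ===== PORT B =====
def split_by_multiple_keep_delim_alt (text : String) (delims : List String) : List String :=
  let sent : Char := Char.ofNat 0
  let marked : List Char :=
    (delims.map String.toList).foldl
      (fun t delim => PySem.Chars.replace t delim (delim ++ [sent])) text.toList
  ((PySem.Chars.splitOn marked [sent]).filter (fun p => !p.isEmpty)).map
    (fun p => String.ofList (PySem.Chars.strip p))

-- ===== PRECONDITION & SPEC =====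
-- Pre_ excludes only the inputs on which A raises: an empty-string delimiter makes
-- Python's s.split(delim) raise ValueError.
def Pre_split_by_multiple_keep_delim (text : String) (delims : List String) : Prop :=
  "" ∉ delims
instance (text : String) (delims : List String) : Decidable (Pre_split_by_multiple_keep_delim text delims) := by unfold Pre_split_by_multiple_keep_delim; infer_instance

def pvWitness_split_by_multiple_keep_delim : String × List String := ("a, b. c", [",", "."])

def Spec_split_by_multiple_keep_delim (text : String) (delims : List String) (out : List String) : Prop := out = split_by_multiple_keep_delim_alt text delims
instance (text : String) (delims : List String) (out : List String) : Decidable (Spec_split_by_multiple_keep_delim text delims out) := by unfold Spec_split_by_multiple_keep_delim; infer_instance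

-- ===== CLAIM (what is proved, stated in full; the proofs are below) =====
def Claim_equal_split_by_multiple_keep_delim : Prop := ∀ (text : String) (delims : List String), Dom_split_by_multiple_keep_delim text delims → Pre_split_by_multiple_keep_delim text delims → Spec_split_by_multiple_keep_delim text delims (split_by_multiple_keep_delim text delims)

-- ===== LEMMAS AND PROOFS =====

-- `f` applied to the head piece only / to every piece but the last
def mapHd (f : List Char → List Char) : List (List Char) → List (List Char)
  | [] => []
  | x :: t => f x :: t

def mbl (f : List Char → List Char) : List (List Char) → List (List Char)
  | [] => []
  | [x] => [x]
  | x :: y :: t => f x :: mbl f (y :: t)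

-- A's per-delimiter round, named for the proofs
def aStep (d : List Char) (res : List (List Char)) : List (List Char) :=
  res.flatMap (fun s => mbl (· ++ d) (PySem.Chars.splitOn s d))

-- accumulator-free characterisation of PySem.Chars.replace.go
theorem rgo_eq (old nw : List Char) (hold : old ≠ []) :
    ∀ fuel l acc, l.length ≤ fuel →
      PySem.Chars.replace.go old nw fuel l acc =
        acc.reverse ++ PySem.Chars.replace.go old nw l.length l [] := by
  intro fuel
  induction fuel using Nat.strong_induction_on with
  | _ F IH =>
    intro l acc h
    match F, l with
    | 0, l =>
      have hl : l = [] := by cases l with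
        | nil => rfl
        | cons c t => simp at h
      subst hl; simp [PySem.Chars.replace.go]
    | (F+1), [] => simp [PySem.Chars.replace.go]
    | (F+1), (c :: t) =>
      have hdrop : ((c :: t).drop old.length).length ≤ t.length := by
        cases old with
        | nil => exact absurd rfl hold
        | cons o os => simp only [List.length_drop, List.length_cons]; omega
      have hlen : t.length + 1 ≤ F + 1 := h
      simp only [PySem.Chars.replace.go, List.length_cons]
      split
      · rw [IH F (by omega) _ _ (by omega),
            IH t.length (by omega) _ _ (by omega)]
        simp
      · rw [IH F (by omega) t (c :: acc) (by omega),
            IH t.length (by omega) t [c] (by omega)]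
        simp

-- accumulator-free characterisation of PySem.Chars.splitOn.go
theorem sgo_eq (sep : List Char) (hsep : sep ≠ []) :
    ∀ fuel l cur acc, l.length < fuel →
      PySem.Chars.splitOn.go sep fuel l cur acc =
        acc.reverse ++ mapHd (fun x => cur.reverse ++ x)
          (PySem.Chars.splitOn.go sep (l.length + 1) l [] []) := by
  intro fuel
  induction fuel using Nat.strong_induction_on with
  | _ F IH =>
    intro l cur acc h
    match F, l with
    | 0, l => omega
    | (F+1), [] => simp [PySem.Chars.splitOn.go, mapHd]
    | (F+1), (c :: t) =>
      have hdrop : ((c :: t).drop sep.length).length ≤ t.length := by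
        cases sep with
        | nil => exact absurd rfl hsep
        | cons o os => simp only [List.length_drop, List.length_cons]; omega
      have hlen : t.length + 1 < F + 1 := h
      simp only [PySem.Chars.splitOn.go, List.length_cons]
      split
      · rw [IH F (by omega) _ _ _ (by omega),
            IH (t.length + 1) (by omega) _ _ _ (by omega)]
        generalize PySem.Chars.splitOn.go sep (((c :: t).drop sep.length).length + 1) ((c :: t).drop sep.length) [] [] = X
        cases X <;> simp [mapHd]
      · rw [IH F (by omega) t (c :: cur) acc (by omega),
            IH (t.length + 1) (by omega) t [c] [] (by omega)]
        generalize PySem.Chars.splitOn.go sep (t.length + 1) t [] [] = X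
        cases X <;> simp [mapHd]

theorem rep_nil (old nw : List Char) (hold : old ≠ []) :
    PySem.Chars.replace [] old nw = [] := by
  simp [PySem.Chars.replace, PySem.Chars.replace.go, hold]

theorem rep_cons (old nw : List Char) (hold : old ≠ []) (c : Char) (t : List Char) :
    PySem.Chars.replace (c :: t) old nw =
      if old.isPrefixOf (c :: t) then nw ++ PySem.Chars.replace ((c :: t).drop old.length) old nw
      else c :: PySem.Chars.replace t old nw := by
  have hdrop : ((c :: t).drop old.length).length ≤ t.length := by
    cases old with
    | nil => exact absurd rfl hold
    | cons o os => simp only [List.length_drop, List.length_cons]; omega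
  simp only [PySem.Chars.replace, List.isEmpty_iff, hold, if_false,
    List.length_cons, PySem.Chars.replace.go]
  split_ifs with hp
  · rw [rgo_eq old nw hold t.length _ _ (by omega)]
    simp [List.length_drop]
  · rw [rgo_eq old nw hold t.length t [c] (by omega)]; simp

theorem split_nil (sep : List Char) :
    PySem.Chars.splitOn [] sep = [[]] := by
  simp [PySem.Chars.splitOn, PySem.Chars.splitOn.go]

theorem split_cons (sep : List Char) (hsep : sep ≠ []) (c : Char) (t : List Char) :
    PySem.Chars.splitOn (c :: t) sep =
      if sep.isPrefixOf (c :: t) then [] :: PySem.Chars.splitOn ((c :: t).drop sep.length) sep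
      else mapHd (fun x => c :: x) (PySem.Chars.splitOn t sep) := by
  have hdrop : ((c :: t).drop sep.length).length ≤ t.length := by
    cases sep with
    | nil => exact absurd rfl hsep
    | cons o os => simp only [List.length_drop, List.length_cons]; omega
  simp only [PySem.Chars.splitOn, List.length_cons, PySem.Chars.splitOn.go]
  split_ifs with hp
  · rw [sgo_eq sep hsep (t.length + 1) _ _ _ (by omega)]
    generalize PySem.Chars.splitOn.go sep (((c :: t).drop sep.length).length + 1) ((c :: t).drop sep.length) [] [] = X
    cases X <;> simp [mapHd]
  · rw [sgo_eq sep hsep (t.length + 1) t [c] [] (by omega)]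
    generalize PySem.Chars.splitOn.go sep (t.length + 1) t [] [] = X
    cases X <;> simp [mapHd]

theorem split_ne_nil (sep : List Char) (hsep : sep ≠ []) (l : List Char) :
    PySem.Chars.splitOn l sep ≠ [] := by
  have H : ∀ (n : Nat) (l : List Char), l.length ≤ n → PySem.Chars.splitOn l sep ≠ [] := by
    intro n
    induction n using Nat.strong_induction_on with
    | _ n IH =>
      intro l hl
      cases l with
      | nil => rw [split_nil sep]; simp
      | cons c t =>
        have hdrop : ((c :: t).drop sep.length).length ≤ t.length := by
          cases sep with
          | nil => exact absurd rfl hsep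
          | cons o os => simp only [List.length_drop, List.length_cons]; omega
        rw [split_cons sep hsep c t]
        split
        · simp
        · have := IH t.length (by simp at hl; omega) t le_rfl
          generalize hx : PySem.Chars.splitOn t sep = X at this
          cases X <;> simp [mapHd] at this ⊢
  exact H l.length l le_rfl

theorem mbl_ne_nil (f : List Char → List Char) (L : List (List Char)) (h : L ≠ []) :
    mbl f L ≠ [] := by
  cases L with
  | nil => exact absurd rfl h
  | cons x t => cases t <;> simp [mbl]

theorem mem_mbl (f : List Char → List Char) (L : List (List Char)) (x : List Char)
    (hx : x ∈ mbl f L) : x ∈ L ∨ ∃ y ∈ L, x = f y := by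
  induction L with
  | nil => simp [mbl] at hx
  | cons a t IH =>
    cases t with
    | nil => simp [mbl] at hx; simp [hx]
    | cons b r =>
      simp only [mbl, List.mem_cons] at hx
      rcases hx with h | h
      · right; exact ⟨a, by simp, h⟩
      · rcases IH h with h' | ⟨y, hy, hxy⟩
        · left; simp [h']
        · right; exact ⟨y, by simp [hy], hxy⟩

theorem mbl_cons_of_ne (f : List Char → List Char) (x : List Char) (L : List (List Char))
    (h : L ≠ []) : mbl f (x :: L) = f x :: mbl f L := by
  cases L with
  | nil => exact absurd rfl h
  | cons y t => rfl

theorem join_singleton' (s a : List Char) : PySem.Chars.join s [a] = a := by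
  simp [PySem.Chars.join, List.intercalate]

theorem join_cons (s a : List Char) (L : List (List Char)) (h : L ≠ []) :
    PySem.Chars.join s (a :: L) = a ++ s ++ PySem.Chars.join s L := by
  cases L with
  | nil => exact absurd rfl h
  | cons b t => simp [PySem.Chars.join, List.intercalate]

theorem join_append (m : Char) (A B : List (List Char)) (hA : A ≠ []) (hB : B ≠ []) :
    PySem.Chars.join [m] (A ++ B) = PySem.Chars.join [m] A ++ m :: PySem.Chars.join [m] B := by
  induction A with
  | nil => exact absurd rfl hA
  | cons a t IH =>
    cases t with
    | nil => simp [join_cons _ _ _ hB]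
    | cons b r =>
      rw [List.cons_append, join_cons _ _ _ (by simp), join_cons _ _ _ (by simp),
        IH (by simp)]
      simp

-- a prefix test cannot see past the marker when the pattern avoids it
theorem isPrefixOf_append_marker (m : Char) (old a b : List Char)
    (hmo : m ∉ old) (hma : m ∉ a) :
    old.isPrefixOf (a ++ m :: b) = old.isPrefixOf a := by
  induction old generalizing a with
  | nil => rfl
  | cons o os IH =>
    cases a with
    | nil =>
      have : (o == m) = false := by
        simp only [beq_eq_false_iff_ne]; intro h; exact hmo (by simp [h])
      simp [List.isPrefixOf, this]
    | cons x xs =>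
      simp only [List.cons_append, List.isPrefixOf]
      rw [IH xs (fun h => hmo (List.mem_cons_of_mem _ h)) (fun h => hma (List.mem_cons_of_mem _ h))]

theorem split_marker_free (m : Char) (p : List Char) (hp : m ∉ p) :
    PySem.Chars.splitOn p [m] = [p] := by
  induction p with
  | nil => exact split_nil [m]
  | cons c t IH =>
    have hcm : (m == c) = false := by
      simp only [beq_eq_false_iff_ne]; intro h; exact hp (by simp [h])
    rw [split_cons [m] (by simp) c t]
    have : ([m].isPrefixOf (c :: t)) = false := by simp [List.isPrefixOf, hcm]
    rw [this]
    simp only [Bool.false_eq_true, if_false]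
    rw [IH (fun h => hp (List.mem_cons_of_mem _ h))]
    rfl

theorem split_marker_cons (m : Char) (p rest : List Char) (hp : m ∉ p) :
    PySem.Chars.splitOn (p ++ m :: rest) [m] = p :: PySem.Chars.splitOn rest [m] := by
  induction p with
  | nil =>
    rw [List.nil_append, split_cons [m] (by simp) m rest]
    have : ([m].isPrefixOf (m :: rest)) = true := by simp [List.isPrefixOf]
    rw [this]
    simp
  | cons c t IH =>
    have hcm : (m == c) = false := by
      simp only [beq_eq_false_iff_ne]; intro h; exact hp (by simp [h])
    rw [List.cons_append, split_cons [m] (by simp) c (t ++ m :: rest)]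
    have : ([m].isPrefixOf (c :: (t ++ m :: rest))) = false := by simp [List.isPrefixOf, hcm]
    rw [this]
    simp only [Bool.false_eq_true, if_false]
    rw [IH (fun h => hp (List.mem_cons_of_mem _ h))]
    rfl

theorem split_join (m : Char) (parts : List (List Char)) (hne : parts ≠ [])
    (hfree : ∀ p ∈ parts, m ∉ p) :
    PySem.Chars.splitOn (PySem.Chars.join [m] parts) [m] = parts := by
  induction parts with
  | nil => exact absurd rfl hne
  | cons p rest IH =>
    cases rest with
    | nil => rw [join_singleton', split_marker_free m p (hfree p (by simp))]
    | cons q r =>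
      rw [join_cons _ _ _ (by simp), List.append_assoc, List.singleton_append,
        split_marker_cons m p _ (hfree p (by simp)),
        IH (by simp) (fun x hx => hfree x (List.mem_cons_of_mem _ hx))]

theorem mem_split_subset (sep : List Char) (hsep : sep ≠ []) (l x : List Char)
    (hx : x ∈ PySem.Chars.splitOn l sep) : ∀ c ∈ x, c ∈ l := by
  have H : ∀ (n : Nat) (l x : List Char), l.length ≤ n →
      x ∈ PySem.Chars.splitOn l sep → ∀ c ∈ x, c ∈ l := by
    intro n
    induction n using Nat.strong_induction_on with
    | _ n IH =>
      intro l x hl hx c hc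
      cases l with
      | nil =>
        rw [split_nil sep] at hx
        simp at hx
        subst hx; simp at hc
      | cons a t =>
        have hdrop : ((a :: t).drop sep.length).length ≤ t.length := by
          cases sep with
          | nil => exact absurd rfl hsep
          | cons o os => simp only [List.length_drop, List.length_cons]; omega
        have hlt : t.length < n := by simp at hl; omega
        rw [split_cons sep hsep a t] at hx
        split at hx
        · rcases List.mem_cons.mp hx with h | h
          · subst h; simp at hc
          · exact List.drop_subset _ _ (IH t.length hlt _ x hdrop h c hc)
        · generalize hX : PySem.Chars.splitOn t sep = X at hx
          cases X with
          | nil => simp [mapHd] at hx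
          | cons y r =>
            rcases List.mem_cons.mp hx with h | h
            · subst h
              rcases List.mem_cons.mp hc with h' | h'
              · simp [h']
              · exact List.mem_cons_of_mem _ (IH t.length hlt t y le_rfl (by rw [hX]; simp) c h')
            · exact List.mem_cons_of_mem _
                (IH t.length hlt t x le_rfl (by rw [hX]; exact List.mem_cons_of_mem _ h) c hc)
  exact H l.length l x le_rfl hx

theorem rep_eq_join_mbl (m : Char) (old : List Char) (hold : old ≠ []) (hmo : m ∉ old)
    (l : List Char) :
    PySem.Chars.replace l old (old ++ [m]) =
      PySem.Chars.join [m] (mbl (· ++ old) (PySem.Chars.splitOn l old)) := by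
  have H : ∀ (n : Nat) (l : List Char), l.length ≤ n →
      PySem.Chars.replace l old (old ++ [m]) =
        PySem.Chars.join [m] (mbl (· ++ old) (PySem.Chars.splitOn l old)) := by
    intro n
    induction n using Nat.strong_induction_on with
    | _ n IH =>
      intro l hl
      cases l with
      | nil => rw [rep_nil _ _ hold, split_nil old]; rfl
      | cons c t =>
        have hdrop : ((c :: t).drop old.length).length ≤ t.length := by
          cases old with
          | nil => exact absurd rfl hold
          | cons o os => simp only [List.length_drop, List.length_cons]; omega
        have hlt : t.length < n := by simp at hl; omega
        rw [rep_cons old _ hold c t, split_cons old hold c t]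
        split
        · rw [IH t.length hlt _ hdrop,
            mbl_cons_of_ne _ _ _ (split_ne_nil old hold _),
            join_cons _ _ _ (mbl_ne_nil _ _ (split_ne_nil old hold _))]
          simp
        · rw [IH t.length hlt t le_rfl]
          generalize hX : PySem.Chars.splitOn t old = X
          have hXne : X ≠ [] := hX ▸ split_ne_nil old hold t
          cases X with
          | nil => exact absurd rfl hXne
          | cons y r =>
            cases r with
            | nil => simp [mapHd, mbl]
            | cons z r' =>
              rw [show mapHd (fun x => c :: x) (y :: z :: r') = (c :: y) :: z :: r' from rfl,
                show mbl (· ++ old) ((c :: y) :: z :: r') = ((c :: y) ++ old) :: mbl (· ++ old) (z :: r') from rfl,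
                show mbl (· ++ old) (y :: z :: r') = (y ++ old) :: mbl (· ++ old) (z :: r') from rfl,
                join_cons _ _ _ (mbl_ne_nil _ _ (by simp)),
                join_cons _ _ _ (mbl_ne_nil _ _ (by simp))]
              simp
  exact H l.length l le_rfl

theorem rep_marker (m : Char) (old nw : List Char) (hold : old ≠ []) (hmo : m ∉ old) :
    ∀ a b, m ∉ a →
      PySem.Chars.replace (a ++ m :: b) old nw =
        PySem.Chars.replace a old nw ++ m :: PySem.Chars.replace b old nw := by
  have H : ∀ (n : Nat) (a b : List Char), a.length ≤ n → m ∉ a →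
      PySem.Chars.replace (a ++ m :: b) old nw =
        PySem.Chars.replace a old nw ++ m :: PySem.Chars.replace b old nw := by
    intro n
    induction n using Nat.strong_induction_on with
    | _ n IH =>
      intro a b ha hma
      cases a with
      | nil =>
        rw [List.nil_append, rep_cons old nw hold m b, rep_nil _ _ hold,
          show (old.isPrefixOf (m :: b)) = old.isPrefixOf ([] ++ m :: b) from rfl,
          isPrefixOf_append_marker m old [] b hmo (by simp)]
        cases old with
        | nil => exact absurd rfl hold
        | cons o os => simp [List.isPrefixOf]
      | cons c t =>
        have hlt : t.length < n := by simp at ha; omega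
        rw [List.cons_append, rep_cons old nw hold c (t ++ m :: b),
          rep_cons old nw hold c t,
          show c :: (t ++ m :: b) = (c :: t) ++ m :: b from rfl,
          isPrefixOf_append_marker m old (c :: t) b hmo hma]
        split_ifs with hp
        · have hpre : old <+: (c :: t) := by
            exact List.isPrefixOf_iff_prefix.mp hp
          have hle : old.length ≤ (c :: t).length := hpre.length_le
          rw [List.drop_append_of_le_length hle]
          have hdl : ((c :: t).drop old.length).length ≤ t.length := by
            cases old with
            | nil => exact absurd rfl hold
            | cons o os => simp only [List.length_drop, List.length_cons]; omega
          rw [IH t.length hlt _ b hdl (fun h => hma (List.drop_subset _ _ h))]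
          simp
        · rw [IH t.length hlt t b le_rfl (fun h => hma (List.mem_cons_of_mem _ h))]
          rfl
  exact fun a b hma => H a.length a b le_rfl hma

theorem enum_eq_mbl_gen (d : List Char) :
    ∀ (L : List (List Char)) (s N : Int), N = s + (L.length : Int) - 1 →
      (PySem.List.enumerate L s).map
          (fun ic => ic.2 ++ (if ic.1 ≠ N then d else [])) =
        mbl (· ++ d) L := by
  intro L
  induction L with
  | nil => intro s N _; simp [PySem.List.enumerate_nil, mbl]
  | cons x t IH =>
    intro s N hN
    cases t with
    | nil =>
      have : N = s := by simp at hN; omega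
      subst this
      simp [PySem.List.enumerate_cons, PySem.List.enumerate_nil, mbl]
    | cons y r =>
      have hsN : s ≠ N := by
        have : (0 : Int) ≤ ((y :: r).length : Int) := by positivity
        simp only [List.length_cons] at hN
        push_cast at hN
        omega
      rw [PySem.List.enumerate_cons, List.map_cons]
      rw [IH (s + 1) N (by simp only [List.length_cons] at hN ⊢; push_cast at hN ⊢; omega),
        show mbl (· ++ d) (x :: y :: r) = (x ++ d) :: mbl (· ++ d) (y :: r) from rfl]
      simp [hsN]

theorem enum_eq_mbl (d : List Char) (L : List (List Char)) :
    (PySem.List.enumerate L).map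
        (fun ic => ic.2 ++ (if ic.1 ≠ (L.length : Int) - 1 then d else [])) =
      mbl (· ++ d) L := by
  exact enum_eq_mbl_gen d L 0 ((L.length : Int) - 1) (by ring)

theorem aStep_ne_nil (d : List Char) (hd : d ≠ []) (res : List (List Char)) (h : res ≠ []) :
    aStep d res ≠ [] := by
  cases res with
  | nil => exact absurd rfl h
  | cons p rest =>
    have := mbl_ne_nil (· ++ d) _ (split_ne_nil d hd p)
    simp only [aStep, List.flatMap_cons]
    intro hcon
    rcases List.append_eq_nil_iff.mp hcon with ⟨h1, _⟩
    exact this h1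

theorem aStep_free (m : Char) (d : List Char) (hd : d ≠ []) (hmd : m ∉ d)
    (res : List (List Char)) (hfree : ∀ p ∈ res, m ∉ p) : ∀ p ∈ aStep d res, m ∉ p := by
  intro p hp
  simp only [aStep, List.mem_flatMap] at hp
  rcases hp with ⟨s, hs, hmem⟩
  rcases mem_mbl _ _ _ hmem with h | ⟨y, hy, rfl⟩
  · intro hc
    exact hfree s hs (mem_split_subset d hd s p h m hc)
  · intro hc
    rcases List.mem_append.mp hc with h' | h'
    · exact hfree s hs (mem_split_subset d hd s y hy m h')
    · exact hmd h'

theorem delimRound_eq (m : Char) (d : List Char) (hd : d ≠ []) (hmd : m ∉ d) :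
    ∀ res, res ≠ [] → (∀ p ∈ res, m ∉ p) →
      PySem.Chars.replace (PySem.Chars.join [m] res) d (d ++ [m]) =
        PySem.Chars.join [m] (aStep d res) := by
  intro res
  induction res with
  | nil => intro h; exact absurd rfl h
  | cons s rest IH =>
    intro _ hfree
    cases rest with
    | nil =>
      rw [join_singleton', rep_eq_join_mbl m d hd hmd s]
      simp [aStep]
    | cons q r =>
      rw [join_cons _ _ _ (by simp), List.append_assoc, List.singleton_append,
        rep_marker m d (d ++ [m]) hd hmd s _ (hfree s (by simp)),
        rep_eq_join_mbl m d hd hmd s,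
        IH (by simp) (fun p hp => hfree p (List.mem_cons_of_mem _ hp)),
        show aStep d (s :: q :: r) = mbl (· ++ d) (PySem.Chars.splitOn s d) ++ aStep d (q :: r) from rfl,
        join_append m _ _ (mbl_ne_nil _ _ (split_ne_nil d hd s)) (aStep_ne_nil d hd _ (by simp))]

theorem fold_inv (m : Char) (DS : List (List Char)) (hDS : ∀ d ∈ DS, d ≠ [] ∧ m ∉ d) :
    ∀ res, res ≠ [] → (∀ p ∈ res, m ∉ p) →
      DS.foldl (fun t d => PySem.Chars.replace t d (d ++ [m])) (PySem.Chars.join [m] res) =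
          PySem.Chars.join [m] (DS.foldl (fun r d => aStep d r) res) ∧
        DS.foldl (fun r d => aStep d r) res ≠ [] ∧
        (∀ p ∈ DS.foldl (fun r d => aStep d r) res, m ∉ p) := by
  induction DS with
  | nil => intro res h1 h2; exact ⟨rfl, h1, h2⟩
  | cons d DS' IH =>
    intro res h1 h2
    obtain ⟨hd, hmd⟩ := hDS d (by simp)
    have hstep := delimRound_eq m d hd hmd res h1 h2
    simp only [List.foldl_cons]
    rw [hstep]
    exact IH (fun x hx => hDS x (List.mem_cons_of_mem _ hx)) (aStep d res)
      (aStep_ne_nil d hd res h1) (aStep_free m d hd hmd res h2)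

theorem dom_str_free (s : String) (h : pvDomStr s = true) : Char.ofNat 0 ∉ s.toList := by
  intro hmem
  have := List.all_eq_true.mp h _ hmem
  simp [pvDomChar] at this

-- ===== VERDICT (by name: the statement is the Claim_ definition above) =====
theorem filter_len_eq_isEmpty (L : List (List Char)) :
    L.filter (fun s => 0 < s.length) = L.filter (fun p => !p.isEmpty) := by
  apply List.filter_congr
  intro x _
  cases x <;> simp

theorem split_by_multiple_keep_delim_spec : Claim_equal_split_by_multiple_keep_delim := by
  intro text delims hdom hpre
  unfold Spec_split_by_multiple_keep_delim
  obtain ⟨ht, hds⟩ : pvDomStr text = true ∧ delims.all (fun y0_ => pvDomStr y0_) = true := by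
    simpa [Dom_split_by_multiple_keep_delim, Bool.and_eq_true] using hdom
  have hmt : Char.ofNat 0 ∉ text.toList := dom_str_free text ht
  have hDS : ∀ d ∈ delims.map String.toList, d ≠ [] ∧ Char.ofNat 0 ∉ d := by
    intro d hd
    rcases List.mem_map.mp hd with ⟨s, hs, rfl⟩
    refine ⟨?_, dom_str_free s (List.all_eq_true.mp hds s hs)⟩
    intro hnil
    apply hpre
    have : s = "" := String.toList_inj.mp (by simp [hnil])
    exact this ▸ hs
  have hA :
      (delims.map String.toList).foldl
        (fun res delim =>
          res.flatMap (fun s =>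
            let origSplit := (PySem.Chars.split? s delim).getD []
            (PySem.List.enumerate origSplit).map
              (fun ic => ic.2 ++ (if ic.1 ≠ (origSplit.length : Int) - 1 then delim else []))))
        [text.toList] =
      (delims.map String.toList).foldl (fun r d => aStep d r) [text.toList] := by
    apply PySem.List.foldl_congr_mem
    intro acc d hd
    obtain ⟨hdne, _⟩ := hDS d hd
    unfold aStep
    congr 1
    funext s
    have hsplit : (PySem.Chars.split? s d).getD [] = PySem.Chars.splitOn s d := by
      simp [PySem.Chars.split?, List.isEmpty_iff, hdne]
    simp only [hsplit]
    exact enum_eq_mbl d _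
  obtain ⟨hfold, hRne, hRfree⟩ :=
    fold_inv (Char.ofNat 0) (delims.map String.toList) hDS [text.toList] (by simp)
      (by intro p hp; rw [List.mem_singleton.mp hp]; exact hmt)
  rw [join_singleton'] at hfold
  unfold split_by_multiple_keep_delim split_by_multiple_keep_delim_alt
  simp only []
  rw [hA, hfold, split_join (Char.ofNat 0) _ hRne hRfree, filter_len_eq_isEmpty]
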